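-- pv_equiv track=rewrite | github.com/baekhwo/ticker_or_name_analyzer | ticker_or_name_10k_analyzer.py | _prefer_units
-- ===== SOURCE A (Python) =====
-- def _prefer_units(units_dict):
--     if not isinstance(units_dict, dict):
--         return []
--     usd = []
--     m = []
--     th = []
--     other = []
--     for unit_name, facts in units_dict.items():
--         ln = unit_name.lower()
--         if ln == "usd":
--             usd.append((unit_name, facts))
--         elif "usd(m)" in ln or "usdm" in ln or "million" in ln:
--             m.append((unit_name, facts))
--         elif "thousand" in ln or "usd(th)" in ln or "usd thousands" in ln:
--             th.append((unit_name, facts))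
--         else:
--             other.append((unit_name, facts))
--     return usd + m + th + other
-- ===== SOURCE B (Python) =====
-- def _prefer_units(units_dict):
--     if not isinstance(units_dict, dict):
--         return []
--
--     def rank(name):
--         ln = name.lower()
--         if ln == "usd":
--             return 0
--         if "usd(m)" in ln or "usdm" in ln or "million" in ln:
--             return 1
--         if "thousand" in ln or "usd(th)" in ln or "usd thousands" in ln:
--             return 2
--         return 3
--
--     return sorted(units_dict.items(), key=lambda kv: rank(kv[0]))
-- ===== Notes on version B (the rewrite author's own statement) =====
-- stated objective: idiomatic
-- what changed: Replaces the four manual accumulator lists and their concatenation by a priority-rank helper and a single stable sorted() call, whose stability preserves dict order within each rank.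
import Mathlib
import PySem

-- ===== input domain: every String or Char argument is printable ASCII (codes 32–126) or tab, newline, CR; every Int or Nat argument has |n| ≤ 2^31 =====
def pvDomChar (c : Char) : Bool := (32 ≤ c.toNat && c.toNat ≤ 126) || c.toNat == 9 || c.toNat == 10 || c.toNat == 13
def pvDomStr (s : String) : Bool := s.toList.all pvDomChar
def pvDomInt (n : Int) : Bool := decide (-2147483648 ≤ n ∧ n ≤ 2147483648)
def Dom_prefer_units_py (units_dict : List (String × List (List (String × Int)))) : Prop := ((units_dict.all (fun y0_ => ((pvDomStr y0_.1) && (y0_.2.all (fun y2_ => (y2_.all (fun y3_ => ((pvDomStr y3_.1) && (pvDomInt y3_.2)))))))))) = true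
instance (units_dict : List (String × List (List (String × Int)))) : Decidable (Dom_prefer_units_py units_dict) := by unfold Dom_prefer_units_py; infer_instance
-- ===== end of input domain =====

-- B replaces A's four manual accumulator lists with a priority-rank helper and one stable sort (idiomatic, not faster).
-- The `isinstance(units_dict, dict)` guard of both Pythons is always true under the type convention and is not ported.

-- ===== PORT A =====
-- one pass over the items, appending each pair to one of four buckets, then concatenating
def prefer_units_py (units_dict : List (String × List (List (String × Int)))) : List (String × (List (List (String × Int)))) :=
  let st := units_dict.foldl
    (fun (st : List (String × List (List (String × Int))) × List (String × List (List (String × Int))) ×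
               List (String × List (List (String × Int))) × List (String × List (List (String × Int)))) kv =>
      let (usd, m, th, other) := st
      let ln := PySem.Str.lower kv.1
      if ln = "usd" then (usd ++ [kv], m, th, other)
      else if PySem.Str.isIn "usd(m)" ln || PySem.Str.isIn "usdm" ln || PySem.Str.isIn "million" ln then
        (usd, m ++ [kv], th, other)
      else if PySem.Str.isIn "thousand" ln || PySem.Str.isIn "usd(th)" ln || PySem.Str.isIn "usd thousands" ln then
        (usd, m, th ++ [kv], other)
      else (usd, m, th, other ++ [kv]))
    ([], [], [], [])
  st.1 ++ st.2.1 ++ st.2.2.1 ++ st.2.2.2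

-- ===== PORT B =====
-- B's rank helper: same ordered checks, as a priority 0..3
def pvRank (name : String) : Int :=
  let ln := PySem.Str.lower name
  if ln = "usd" then 0
  else if PySem.Str.isIn "usd(m)" ln || PySem.Str.isIn "usdm" ln || PySem.Str.isIn "million" ln then 1
  else if PySem.Str.isIn "thousand" ln || PySem.Str.isIn "usd(th)" ln || PySem.Str.isIn "usd thousands" ln then 2
  else 3

def prefer_units_py_alt (units_dict : List (String × List (List (String × Int)))) : List (String × (List (List (String × Int)))) :=
  PySem.List.sorted units_dict (fun kv => pvRank kv.1) false

-- ===== PRECONDITION & SPEC =====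
def Spec_prefer_units_py (units_dict : List (String × List (List (String × Int)))) (out : List (String × (List (List (String × Int))))) : Prop := out = prefer_units_py_alt units_dict
instance (units_dict : List (String × List (List (String × Int)))) (out : List (String × (List (List (String × Int))))) : Decidable (Spec_prefer_units_py units_dict out) := by unfold Spec_prefer_units_py; infer_instance

-- ===== CLAIM (what is proved, stated in full; the proofs are below) =====
def Claim_equal_prefer_units_py : Prop := ∀ (units_dict : List (String × List (List (String × Int)))), Dom_prefer_units_py units_dict → Spec_prefer_units_py units_dict (prefer_units_py units_dict)

-- ===== LEMMAS AND PROOFS =====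

-- the canonical value both programs compute: the rank-r elements of xs, in order, for r = 0,1,2,3
def pvFilt (r : Int) (xs : List (String × List (List (String × Int)))) : List (String × List (List (String × Int))) :=
  xs.filter (fun kv => pvRank kv.1 = r)

def pvCat (xs : List (String × List (List (String × Int)))) : List (String × List (List (String × Int))) :=
  pvFilt 0 xs ++ pvFilt 1 xs ++ pvFilt 2 xs ++ pvFilt 3 xs

theorem pvRank_cases (s : String) : pvRank s = 0 ∨ pvRank s = 1 ∨ pvRank s = 2 ∨ pvRank s = 3 := by
  simp only [pvRank]; split_ifs <;> simp

theorem pvFilt_cons (r : Int) (x : String × List (List (String × Int)))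
    (xs : List (String × List (List (String × Int)))) :
    pvFilt r (x :: xs) = if pvRank x.1 = r then x :: pvFilt r xs else pvFilt r xs := by
  simp [pvFilt, List.filter_cons]

theorem pvFilt_append_singleton (r : Int) (xs : List (String × List (List (String × Int))))
    (x : String × List (List (String × Int))) :
    pvFilt r (xs ++ [x]) = pvFilt r xs ++ (if pvRank x.1 = r then [x] else []) := by
  simp [pvFilt, List.filter_append]; split_ifs <;> simp_all

theorem pvRank_of_mem_filt {r : Int} {xs : List (String × List (List (String × Int)))}
    {y : String × List (List (String × Int))} (h : y ∈ pvFilt r xs) : pvRank y.1 = r := by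
  simpa using (List.of_mem_filter h)

-- A's loop, with arbitrary accumulators, produces the four filters appended to them
theorem pvA_loop (xs : List (String × List (List (String × Int))))
    (u m t o : List (String × List (List (String × Int)))) :
    xs.foldl
      (fun (st : List (String × List (List (String × Int))) × List (String × List (List (String × Int))) ×
                 List (String × List (List (String × Int))) × List (String × List (List (String × Int)))) kv =>
        let (usd, m, th, other) := st
        let ln := PySem.Str.lower kv.1
        if ln = "usd" then (usd ++ [kv], m, th, other)
        else if PySem.Str.isIn "usd(m)" ln || PySem.Str.isIn "usdm" ln || PySem.Str.isIn "million" ln then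
          (usd, m ++ [kv], th, other)
        else if PySem.Str.isIn "thousand" ln || PySem.Str.isIn "usd(th)" ln || PySem.Str.isIn "usd thousands" ln then
          (usd, m, th ++ [kv], other)
        else (usd, m, th, other ++ [kv]))
      (u, m, t, o)
    = (u ++ pvFilt 0 xs, m ++ pvFilt 1 xs, t ++ pvFilt 2 xs, o ++ pvFilt 3 xs) := by
  induction xs generalizing u m t o with
  | nil => simp [pvFilt]
  | cons x xs ih =>
    simp only [List.foldl_cons]
    split_ifs with h0 h1 h2
    · have hr : pvRank x.1 = 0 := by simp only [pvRank]; rw [if_pos h0]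
      rw [ih]; simp [pvFilt_cons, hr]
    · have hr : pvRank x.1 = 1 := by simp only [pvRank]; rw [if_neg h0, if_pos h1]
      rw [ih]; simp [pvFilt_cons, hr]
    · have hr : pvRank x.1 = 2 := by simp only [pvRank]; rw [if_neg h0, if_neg h1, if_pos h2]
      rw [ih]; simp [pvFilt_cons, hr]
    · have hr : pvRank x.1 = 3 := by simp only [pvRank]; rw [if_neg h0, if_neg h1, if_neg h2]
      rw [ih]; simp [pvFilt_cons, hr]

theorem prefer_units_py_eq_cat (xs : List (String × List (List (String × Int)))) :
    prefer_units_py xs = pvCat xs := by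
  simp only [prefer_units_py]
  rw [pvA_loop]
  simp [pvCat]

-- inserting past a prefix in which nothing comes 'before' x
theorem insertBy_append_of_not_before {α : Type} (before : α → α → Bool) (x : α)
    (p s : List α) (hp : ∀ y ∈ p, before x y = false) :
    PySem.List.insertBy before x (p ++ s) = p ++ PySem.List.insertBy before x s := by
  induction p with
  | nil => simp
  | cons y p ih =>
    have hy : before x y = false := hp y (by simp)
    cases s <;> simp_all [PySem.List.insertBy]

-- stable insertion of a rank-r element into the four concatenated buckets lands at the end of bucket r
theorem insertBy_pvCat (xs : List (String × List (List (String × Int))))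
    (x : String × List (List (String × Int))) :
    PySem.List.insertBy (fun a b => decide (pvRank a.1 < pvRank b.1)) x (pvCat xs) = pvCat (xs ++ [x]) := by
  have hmem : ∀ (r : Int) (y : String × List (List (String × Int))), y ∈ pvFilt r xs → pvRank y.1 = r :=
    fun r y h => pvRank_of_mem_filt h
  have key : ∀ (p s : List (String × List (List (String × Int)))),
      (∀ y ∈ p, ¬ pvRank x.1 < pvRank y.1) → (∀ y ∈ s, pvRank x.1 < pvRank y.1) →
      PySem.List.insertBy (fun a b => decide (pvRank a.1 < pvRank b.1)) x (p ++ s) = p ++ [x] ++ s := by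
    intro p s hp hs
    rw [insertBy_append_of_not_before _ _ _ _ (fun y hy => by simp [hp y hy])]
    cases s with
    | nil => simp [PySem.List.insertBy]
    | cons z s => simp [PySem.List.insertBy, hs z (by simp)]
  have hm : ∀ (rs : List Int) (y : String × List (List (String × Int))),
      (y ∈ (rs.map (fun r => pvFilt r xs)).flatten) → ∃ r ∈ rs, pvRank y.1 = r := by
    intro rs y hy
    rcases List.mem_flatten.1 hy with ⟨l, hl, hyl⟩
    rcases List.mem_map.1 hl with ⟨r, hr, rfl⟩
    exact ⟨r, hr, hmem r y hyl⟩
  rcases pvRank_cases x.1 with h | h | h | h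
  · have e : pvCat xs = ([(0:Int)].map (fun r => pvFilt r xs)).flatten ++
        ([(1:Int),2,3].map (fun r => pvFilt r xs)).flatten := by simp [pvCat]
    rw [e, key _ _ (fun y hy => by rcases hm _ y hy with ⟨r, hr, hry⟩; simp at hr; omega)
              (fun y hy => by rcases hm _ y hy with ⟨r, hr, hry⟩; simp at hr; omega)]
    simp [pvCat, pvFilt_append_singleton, h]
  · have e : pvCat xs = ([(0:Int),1].map (fun r => pvFilt r xs)).flatten ++
        ([(2:Int),3].map (fun r => pvFilt r xs)).flatten := by simp [pvCat]
    rw [e, key _ _ (fun y hy => by rcases hm _ y hy with ⟨r, hr, hry⟩; simp at hr; omega)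
              (fun y hy => by rcases hm _ y hy with ⟨r, hr, hry⟩; simp at hr; omega)]
    simp [pvCat, pvFilt_append_singleton, h]
  · have e : pvCat xs = ([(0:Int),1,2].map (fun r => pvFilt r xs)).flatten ++
        ([(3:Int)].map (fun r => pvFilt r xs)).flatten := by simp [pvCat]
    rw [e, key _ _ (fun y hy => by rcases hm _ y hy with ⟨r, hr, hry⟩; simp at hr; omega)
              (fun y hy => by rcases hm _ y hy with ⟨r, hr, hry⟩; simp at hr; omega)]
    simp [pvCat, pvFilt_append_singleton, h]
  · have e : pvCat xs = ([(0:Int),1,2,3].map (fun r => pvFilt r xs)).flatten ++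
        ([] : List (String × List (List (String × Int)))) := by simp [pvCat]
    rw [e, key _ _ (fun y hy => by rcases hm _ y hy with ⟨r, hr, hry⟩; simp at hr; omega) (by simp)]
    simp [pvCat, pvFilt_append_singleton, h]

theorem prefer_units_py_alt_eq_cat (xs : List (String × List (List (String × Int)))) :
    prefer_units_py_alt xs = pvCat xs := by
  unfold prefer_units_py_alt
  rw [PySem.List.sorted_eq_foldl_insertBy]
  induction xs using List.reverseRecOn with
  | nil => simp [pvCat, pvFilt]
  | append_singleton xs x ih =>
    rw [List.foldl_append, List.foldl_cons, List.foldl_nil, ih, insertBy_pvCat]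

-- ===== VERDICT (by name: the statement is the Claim_ definition above) =====
theorem prefer_units_py_spec : Claim_equal_prefer_units_py := by
  intro xs _
  unfold Spec_prefer_units_py
  rw [prefer_units_py_eq_cat, prefer_units_py_alt_eq_cat]
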